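-- pv_equiv track=rewrite | github.com/me13foundation/monorepo | src/presentation/dash/components/curation/conflict_resolver.py | _get_recommended_significance
-- ===== SOURCE A (Python) =====
-- from typing import Any
--
-- def _get_recommended_significance(
--     significances: dict[str, list[int]],
--     evidence_records: list[dict[str, Any]],
-- ) -> str:
--     """Get recommended clinical significance based on evidence strength."""
--     # Simple logic: prefer significance from highest evidence level
--     level_hierarchy = {"limited": 1, "supporting": 2, "strong": 3, "definitive": 4}
--
--     best_sig = None
--     best_level = 0
--
--     for sig, indices in significances.items():
--         for idx in indices:
--             level = evidence_records[idx].get("evidence_level", "limited")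
--             level_value = level_hierarchy.get(level, 0)
--             if level_value > best_level:
--                 best_level = level_value
--                 best_sig = sig
--
--     return best_sig or next(iter(significances))
-- ===== SOURCE B (Python) =====
-- from typing import Any
--
--
-- def _get_recommended_significance(
--     significances: dict[str, list[int]],
--     evidence_records: list[dict[str, Any]],
-- ) -> str:
--     """Get recommended clinical significance based on evidence strength."""
--     level_hierarchy = {"limited": 1, "supporting": 2, "strong": 3, "definitive": 4}
--
--     # Scan by descending evidence level: the first significance (in dict order)
--     # that has a record exactly at the current target level is the answer.
--     best_sig = next(
--         (sig
--          for target in (4, 3, 2, 1)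
--          for sig, indices in significances.items()
--          if any(level_hierarchy.get(evidence_records[i].get("evidence_level", "limited"), 0) == target
--                 for i in indices)),
--         None,
--     )
--     return best_sig or next(iter(significances))
-- ===== Notes on version B (the rewrite author's own statement) =====
-- stated objective: alternative
-- what changed: Replaces A's single-pass running-max accumulator (best_sig, best_level) by a level-major search: scan target evidence levels in descending order (4,3,2,1) and return the first significance whose index list hits the current target exactly, keeping A's final 'or next(iter(...))' fallback; correct because the first target level with any hit is the global maximum level, and the first group hitting it is A's first strict-improvement winner.
import Mathlib
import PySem

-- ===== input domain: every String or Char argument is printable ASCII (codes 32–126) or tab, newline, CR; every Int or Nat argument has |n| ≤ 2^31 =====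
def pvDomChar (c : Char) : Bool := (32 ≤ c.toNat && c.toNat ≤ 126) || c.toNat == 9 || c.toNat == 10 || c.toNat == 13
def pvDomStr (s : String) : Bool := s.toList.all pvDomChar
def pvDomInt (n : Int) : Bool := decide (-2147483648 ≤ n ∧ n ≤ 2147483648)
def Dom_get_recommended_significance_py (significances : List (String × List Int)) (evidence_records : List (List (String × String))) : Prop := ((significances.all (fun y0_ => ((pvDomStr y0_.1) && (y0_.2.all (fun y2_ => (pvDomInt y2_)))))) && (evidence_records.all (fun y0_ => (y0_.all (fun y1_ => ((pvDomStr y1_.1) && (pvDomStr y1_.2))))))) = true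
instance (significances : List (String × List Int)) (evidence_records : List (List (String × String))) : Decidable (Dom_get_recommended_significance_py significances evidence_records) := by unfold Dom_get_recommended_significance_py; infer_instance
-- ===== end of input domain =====

-- B replaces A's single-pass running-max accumulator by a level-major search:
-- scan target levels 4,3,2,1 in descending order and take the first significance
-- hitting the current target; same cost class, genuinely different traversal.


-- ===== PORT A =====
-- level_hierarchy = {"limited": 1, "supporting": 2, "strong": 3, "definitive": 4}
def pvHier : PySem.Dict String Int :=
  PySem.Dict.mk [("limited", 1), ("supporting", 2), ("strong", 3), ("definitive", 4)]

-- level_hierarchy.get(evidence_records[idx].get("evidence_level", "limited"), 0)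
-- (used verbatim by both Pythons; total via .getD [], exact under Pre_'s InRange condition)
def pvLevelVal (evidence_records : List (List (String × String))) (i : Int) : Int :=
  pvHier.getD
    ((PySem.Dict.mk ((PySem.List.pyGet? evidence_records i).getD [])).getD "evidence_level" "limited") 0

-- next(iter(significances))  (Pre_ requires significances ≠ [], else StopIteration)
def pvFirstKey (significances : List (String × List Int)) : String :=
  ((significances.head?).map Prod.fst).getD ""

def get_recommended_significance_py (significances : List (String × List Int)) (evidence_records : List (List (String × String))) : String :=
  let r := significances.foldl
    (fun (st : Option String × Int) p =>
      p.2.foldl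
        (fun (st : Option String × Int) idx =>
          let lv := pvLevelVal evidence_records idx
          if st.2 < lv then (some p.1, lv) else st) st)
    (none, 0)
  match r.1 with
  | some s => if s = "" then pvFirstKey significances else s
  | none => pvFirstKey significances

-- ===== PORT B =====
-- the inner generator clause: first sig whose indices hit the target level exactly
def pvFindAtLevel (evidence_records : List (List (String × String))) (lv : Int) : List (String × List Int) → Option String
  | [] => none
  | p :: t =>
      if p.2.any (fun i => pvLevelVal evidence_records i == lv) then some p.1
      else pvFindAtLevel evidence_records lv t

def get_recommended_significance_py_alt (significances : List (String × List Int)) (evidence_records : List (List (String × String))) : String :=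
  match ([4, 3, 2, 1] : List Int).findSome? (fun lv => pvFindAtLevel evidence_records lv significances) with
  | some s => if s = "" then pvFirstKey significances else s
  | none => pvFirstKey significances

-- ===== PRECONDITION & SPEC =====
-- Pre_ excludes: the empty dict (A raises StopIteration) and out-of-range indices (A raises
-- IndexError); it also excludes association lists with duplicate significance keys, which do
-- not represent a Python dict (dict iteration visits each key once, the raw list twice).
def Pre_get_recommended_significance_py (significances : List (String × List Int)) (evidence_records : List (List (String × String))) : Prop :=
  significances ≠ [] ∧ (significances.map Prod.fst).Nodup ∧
    ∀ p ∈ significances, ∀ i ∈ p.2, PySem.Raise.InRange evidence_records.length i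
instance (significances : List (String × List Int)) (evidence_records : List (List (String × String))) : Decidable (Pre_get_recommended_significance_py significances evidence_records) := by unfold Pre_get_recommended_significance_py; infer_instance

def pvWitness_get_recommended_significance_py : (List (String × List Int)) × (List (List (String × String))) :=
  ([("pathogenic", [0]), ("benign", [1])],
   [[("evidence_level", "strong")], [("evidence_level", "limited")]])

def Spec_get_recommended_significance_py (significances : List (String × List Int)) (evidence_records : List (List (String × String))) (out : String) : Prop := out = get_recommended_significance_py_alt significances evidence_records
instance (significances : List (String × List Int)) (evidence_records : List (List (String × String))) (out : String) : Decidable (Spec_get_recommended_significance_py significances evidence_records out) := by unfold Spec_get_recommended_significance_py; infer_instance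

-- ===== CLAIM (what is proved, stated in full; the proofs are below) =====
def Claim_equal_get_recommended_significance_py : Prop := ∀ (significances : List (String × List Int)) (evidence_records : List (List (String × String))), Dom_get_recommended_significance_py significances evidence_records → Pre_get_recommended_significance_py significances evidence_records → Spec_get_recommended_significance_py significances evidence_records (get_recommended_significance_py significances evidence_records)

-- ===== LEMMAS AND PROOFS =====

-- B's per-group test is about the group's maximal level; define that score for the proof
def pvScore (evidence_records : List (List (String × String))) (indices : List Int) : Int :=
  (indices.map (fun i => pvLevelVal evidence_records i)).foldl max 0

theorem pvLevelVal_le_four (er : List (List (String × String))) (i : Int) : pvLevelVal er i ≤ 4 := by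
  unfold pvLevelVal
  simp [PySem.Dict.getD_eq_get?_getD, PySem.Dict.get?_mk_cons, pvHier]
  split_ifs <;> norm_num [PySem.Dict.get?]

theorem foldl_max_max (ls : List Int) (a : Int) : ∀ b, ls.foldl max (max a b) = max a (ls.foldl max b) := by
  induction ls with
  | nil => intro b; rfl
  | cons l t ih =>
    intro b
    simp only [List.foldl_cons, max_assoc]
    exact ih (max b l)

theorem mem_le_foldl_max (ls : List Int) : ∀ (a x : Int), x ∈ ls → x ≤ ls.foldl max a := by
  induction ls with
  | nil => intro a x hx; cases hx
  | cons l t ih =>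
    intro a x hx
    simp only [List.foldl_cons]
    rcases List.mem_cons.mp hx with rfl | hx
    · exact le_trans (le_max_right a x) (PySem.List.le_foldl_max t (max a x)).1
    · exact ih (max a l) x hx

theorem foldl_max_attained (ls : List Int) : ∀ a, ls.foldl max a = a ∨ ls.foldl max a ∈ ls := by
  induction ls with
  | nil => intro a; exact Or.inl rfl
  | cons l t ih =>
    intro a
    rcases ih (max a l) with h | h
    · simp only [List.foldl_cons, h]
      rcases max_choice a l with h2 | h2
      · exact Or.inl h2
      · exact Or.inr (by rw [h2]; exact List.mem_cons_self)
    · exact Or.inr (List.mem_cons_of_mem l h)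

theorem pvScore_nonneg (er : List (List (String × String))) (idxs : List Int) : 0 ≤ pvScore er idxs :=
  (PySem.List.le_foldl_max _ 0).1

theorem pvScore_le_four (er : List (List (String × String))) (idxs : List Int) : pvScore er idxs ≤ 4 := by
  unfold pvScore
  rcases foldl_max_attained (idxs.map (fun i => pvLevelVal er i)) 0 with he | he
  · rw [he]; omega
  · obtain ⟨i, _, hv⟩ := List.mem_map.mp he
    rw [← hv]
    exact pvLevelVal_le_four er i

theorem mem_le_pvScore (er : List (List (String × String))) (idxs : List Int) (i : Int)
    (hi : i ∈ idxs) : pvLevelVal er i ≤ pvScore er idxs :=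
  mem_le_foldl_max _ 0 _ (List.mem_map_of_mem hi)

-- no group whose score is below the target can hit the target
theorem any_hit_false (er : List (List (String × String))) (idxs : List Int) (lv : Int)
    (h : pvScore er idxs < lv) : idxs.any (fun i => pvLevelVal er i == lv) = false := by
  rw [List.any_eq_false]
  intro i hi
  have := mem_le_pvScore er idxs i hi
  simp only [beq_iff_eq]
  omega

-- a group with positive score hits its own score
theorem any_hit_self (er : List (List (String × String))) (idxs : List Int)
    (h : 0 < pvScore er idxs) : idxs.any (fun i => pvLevelVal er i == pvScore er idxs) = true := by
  rcases foldl_max_attained (idxs.map (fun i => pvLevelVal er i)) 0 with he | he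
  · exact absurd (show pvScore er idxs = 0 from he) (by omega)
  · obtain ⟨i, hi, hv⟩ := List.mem_map.mp he
    exact List.any_eq_true.mpr ⟨i, hi, by simp [hv]; rfl⟩

-- first-extremal max? unfolded one step
theorem max?_cons_eq {α : Type} (key : α → Int) (g : α) (t : List α) :
    PySem.List.max? (g :: t) key
      = match PySem.List.max? t key with
        | none => some g
        | some m => if key g < key m then some m else some g := by
  have main : ∀ (t : List α) (g : α),
      t.foldl (fun acc x => match acc with
          | none => some x
          | some m => if key m < key x then some x else some m) (some g)
      = match t.foldl (fun acc x => match acc with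
          | none => some x
          | some m => if key m < key x then some x else some m) (none : Option α) with
        | none => some g
        | some m => if key g < key m then some m else some g := by
    intro t
    induction t with
    | nil => intro g; rfl
    | cons h t ih =>
      intro g
      simp only [List.foldl_cons]
      rw [ih h]
      by_cases hgh : key g < key h
      · simp only [hgh, if_pos]
        rw [ih h]
        cases hM : t.foldl (fun acc x => match acc with
            | none => some x
            | some m => if key m < key x then some x else some m) (none : Option α) with
        | none => simp [hgh]
        | some m =>
          simp only
          by_cases h1 : key h < key m <;> by_cases h2 : key g < key m <;>
            simp [h1, h2] <;> omega
      · simp only [hgh, if_false]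
        rw [ih g]
        cases hM : t.foldl (fun acc x => match acc with
            | none => some x
            | some m => if key m < key x then some x else some m) (none : Option α) with
        | none => simp [hgh]
        | some m =>
          simp only
          by_cases h1 : key g < key m <;> by_cases h2 : key h < key m <;>
            simp [h1, h2] <;> omega
  simp only [PySem.List.max?, List.foldl_cons]
  exact main t g

-- A's inner loop over one group's indices, characterised by the group's running max
theorem innerLoop_eq (er : List (List (String × String))) (sig : String) :
    ∀ (idxs : List Int) (bs : Option String) (bl : Int),
      idxs.foldl (fun (st : Option String × Int) idx =>
          let lv := pvLevelVal er idx
          if st.2 < lv then (some sig, lv) else st) (bs, bl)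
      = (let m := (idxs.map (fun i => pvLevelVal er i)).foldl max bl
         if bl < m then (some sig, m) else (bs, bl)) := by
  intro idxs
  induction idxs with
  | nil => intro bs bl; simp
  | cons i t ih =>
    intro bs bl
    simp only [List.foldl_cons, List.map_cons]
    by_cases h : bl < pvLevelVal er i
    · simp only [h, if_pos]
      rw [ih (some sig) (pvLevelVal er i)]
      have hmax : max bl (pvLevelVal er i) = pvLevelVal er i := max_eq_right (le_of_lt h)
      rw [hmax]
      set M := (t.map (fun i => pvLevelVal er i)).foldl max (pvLevelVal er i) with hM
      have hle : pvLevelVal er i ≤ M := (PySem.List.le_foldl_max _ _).1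
      by_cases h2 : pvLevelVal er i < M
      · rw [if_pos h2, if_pos (lt_of_lt_of_le h hle)]
      · have hMe : M = pvLevelVal er i := le_antisymm (not_lt.mp h2) hle
        rw [if_neg h2, hMe, if_pos h]
    · simp only [h, if_false]
      rw [ih bs bl]
      have hmax : max bl (pvLevelVal er i) = bl := max_eq_left (not_lt.mp h)
      rw [hmax]

-- A's outer loop over the significance groups, characterised by the first argmax group
theorem outerLoop_eq (er : List (List (String × String))) :
    ∀ (gs : List (String × List Int)) (bs : Option String) (bl : Int), 0 ≤ bl →
      gs.foldl (fun (st : Option String × Int) p =>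
          p.2.foldl (fun (st : Option String × Int) idx =>
            let lv := pvLevelVal er idx
            if st.2 < lv then (some p.1, lv) else st) st) (bs, bl)
      = match PySem.List.max? gs (fun p => pvScore er p.2) with
        | none => (bs, bl)
        | some p => if bl < pvScore er p.2 then (some p.1, pvScore er p.2) else (bs, bl) := by
  intro gs
  induction gs with
  | nil => intro bs bl _; simp [PySem.List.max?]
  | cons g t ih =>
    intro bs bl hbl
    simp only [List.foldl_cons]
    rw [innerLoop_eq er g.1 g.2 bs bl]
    have hscore : (g.2.map (fun i => pvLevelVal er i)).foldl max bl = max bl (pvScore er g.2) := by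
      unfold pvScore
      have : max bl (0 : Int) = bl := max_eq_left hbl
      conv_lhs => rw [← this]
      exact foldl_max_max _ bl 0
    rw [max?_cons_eq]
    by_cases h : bl < pvScore er g.2
    · have hm : max bl (pvScore er g.2) = pvScore er g.2 := max_eq_right (le_of_lt h)
      simp only [hscore, hm, h, if_pos]
      rw [ih (some g.1) (pvScore er g.2) (pvScore_nonneg er g.2)]
      cases hM : PySem.List.max? t (fun p => pvScore er p.2) with
      | none => simp [h]
      | some m =>
        simp only
        by_cases h2 : pvScore er g.2 < pvScore er m.2
        · simp only [h2, if_pos]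
          rw [if_pos (lt_trans h h2)]
        · simp only [h2, if_false, if_pos h]
    · have hm : max bl (pvScore er g.2) = bl := max_eq_left (not_lt.mp h)
      simp only [hscore, hm, if_neg (lt_irrefl bl)]
      rw [ih bs bl hbl]
      cases hM : PySem.List.max? t (fun p => pvScore er p.2) with
      | none => simp [h]
      | some m =>
        simp only
        by_cases h2 : pvScore er g.2 < pvScore er m.2
        · simp [h2]
        · have : pvScore er m.2 ≤ bl := le_trans (not_lt.mp h2) (not_lt.mp h)
          simp [h2, not_lt.mpr this, h]

-- B's level-major scan, characterised by the first argmax group of A's ordering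
theorem findAtLevel_eq (er : List (List (String × String))) :
    ∀ (gs : List (String × List Int)),
      match PySem.List.max? gs (fun p => pvScore er p.2) with
      | none => True
      | some p =>
          (∀ lv, pvScore er p.2 < lv → pvFindAtLevel er lv gs = none) ∧
          (0 < pvScore er p.2 → pvFindAtLevel er (pvScore er p.2) gs = some p.1) := by
  intro gs
  induction gs with
  | nil => simp [PySem.List.max?]
  | cons g t ih =>
    rw [max?_cons_eq]
    cases hM : PySem.List.max? t (fun p => pvScore er p.2) with
    | none =>
      have ht : t = [] := (PySem.List.max?_eq_none_iff _ _).mp hM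
      subst ht
      refine ⟨fun lv hlv => ?_, fun hpos => ?_⟩
      · simp [pvFindAtLevel, any_hit_false er g.2 lv hlv]
      · simp [pvFindAtLevel, any_hit_self er g.2 hpos]
    | some m =>
      rw [hM] at ih
      obtain ⟨ih1, ih2⟩ := ih
      simp only
      by_cases h : pvScore er g.2 < pvScore er m.2
      · rw [if_pos h]
        refine ⟨fun lv hlv => ?_, fun hpos => ?_⟩
        · simp [pvFindAtLevel, any_hit_false er g.2 lv (lt_trans h hlv), ih1 lv hlv]
        · simp [pvFindAtLevel, any_hit_false er g.2 (pvScore er m.2) h, ih2 hpos]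
      · rw [if_neg h]
        have hle : pvScore er m.2 ≤ pvScore er g.2 := not_lt.mp h
        refine ⟨fun lv hlv => ?_, fun hpos => ?_⟩
        · simp [pvFindAtLevel, any_hit_false er g.2 lv hlv, ih1 lv (lt_of_le_of_lt hle hlv)]
        · simp [pvFindAtLevel, any_hit_self er g.2 hpos]

-- B's four-literal level loop, evaluated against the known maximum M
theorem findSome_levels (f : Int → Option String) (M : Int) (s : String) (h1 : 1 ≤ M) (h4 : M ≤ 4)
    (hnone : ∀ lv, M < lv → f lv = none) (hself : f M = some s) :
    ([4, 3, 2, 1] : List Int).findSome? f = some s := by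
  interval_cases M
  · simp [List.findSome?, hnone 4 (by omega), hnone 3 (by omega), hnone 2 (by omega), hself]
  · simp [List.findSome?, hnone 4 (by omega), hnone 3 (by omega), hself]
  · simp [List.findSome?, hnone 4 (by omega), hself]
  · simp [List.findSome?, hself]

-- ===== VERDICT (by name: the statement is the Claim_ definition above) =====
theorem get_recommended_significance_py_spec : Claim_equal_get_recommended_significance_py := by
  intro significances evidence_records _ hpre
  obtain ⟨hne, _, _⟩ := hpre
  unfold Spec_get_recommended_significance_py
  unfold get_recommended_significance_py get_recommended_significance_py_alt
  rw [outerLoop_eq evidence_records significances none 0 le_rfl]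
  have hchar := findAtLevel_eq evidence_records significances
  cases hM : PySem.List.max? significances (fun p => pvScore evidence_records p.2) with
  | none => exact absurd ((PySem.List.max?_eq_none_iff _ _).mp hM) hne
  | some p =>
    rw [hM] at hchar
    obtain ⟨hnone, hself⟩ := hchar
    dsimp only
    by_cases h : (0 : Int) < pvScore evidence_records p.2
    · rw [if_pos h,
        findSome_levels (fun lv => pvFindAtLevel evidence_records lv significances)
          (pvScore evidence_records p.2) p.1 (by omega)
          (pvScore_le_four evidence_records p.2) hnone (hself h)]
    · have hz : pvScore evidence_records p.2 = 0 :=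
        le_antisymm (not_lt.mp h) (pvScore_nonneg evidence_records p.2)
      have hfind : ([4, 3, 2, 1] : List Int).findSome?
          (fun lv => pvFindAtLevel evidence_records lv significances) = none := by
        simp [List.findSome?, hnone 4 (by omega), hnone 3 (by omega),
          hnone 2 (by omega), hnone 1 (by omega)]
      rw [if_neg h, hfind]
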